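-- pv_equiv track=rewrite | github.com/Jagadish-banoth/agentic-multimodal-rag | wrappers/ocr.py | _get_compatible_languages
-- ===== SOURCE A (Python) =====
-- from typing import Union, List, Tuple, Optional, Dict, Any
--
-- def _get_compatible_languages(requested_langs: List[str]) -> List[str]:
--     """Get EasyOCR-compatible language subset.
--
--     EasyOCR has strict language compatibility rules:
--     - Tamil (ta) ONLY works with English
--     - Other Dravidian languages have their own constraints
--     - Returns the best compatible subset
--     """
--     if not requested_langs:
--         return ["en"]
--
--     # Always include English as base
--     result = ["en"] if "en" not in requested_langs else []
--
--     # Check for Tamil - it's exclusive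
--     if "ta" in requested_langs:
--         return ["en", "ta"]
--
--     # Check for Malayalam - it's exclusive
--     if "ml" in requested_langs:
--         return ["en", "ml"]
--
--     # Telugu and Kannada can work together
--     dravidian = [l for l in requested_langs if l in ["te", "kn"]]
--     if dravidian:
--         return ["en"] + dravidian
--
--     # Devanagari languages can work together
--     devanagari = [l for l in requested_langs if l in ["hi", "mr", "ne"]]
--     if devanagari:
--         return ["en"] + devanagari
--
--     # Default to English only for safety
--     return ["en"]
-- ===== SOURCE B (Python) =====
-- def _get_compatible_languages(requested_langs):
--     """Single pass: classify each language once into flags/buckets, then decide."""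
--     has_ta = False
--     has_ml = False
--     dravidian = []
--     devanagari = []
--     for lang in requested_langs:
--         if lang == "ta":
--             has_ta = True
--         elif lang == "ml":
--             has_ml = True
--         elif lang in ("te", "kn"):
--             dravidian.append(lang)
--         elif lang in ("hi", "mr", "ne"):
--             devanagari.append(lang)
--     if has_ta:
--         return ["en", "ta"]
--     if has_ml:
--         return ["en", "ml"]
--     if dravidian:
--         return ["en"] + dravidian
--     if devanagari:
--         return ["en"] + devanagari
--     return ["en"]
-- ===== Notes on version B (the rewrite author's own statement) =====
-- stated objective: alternative
-- what changed: Replaces A's staged early-return cascade (separate membership scans and filter passes over the list) with one fused pass that classifies every language once into two flags and two buckets, deciding only after the loop.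
import Mathlib
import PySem

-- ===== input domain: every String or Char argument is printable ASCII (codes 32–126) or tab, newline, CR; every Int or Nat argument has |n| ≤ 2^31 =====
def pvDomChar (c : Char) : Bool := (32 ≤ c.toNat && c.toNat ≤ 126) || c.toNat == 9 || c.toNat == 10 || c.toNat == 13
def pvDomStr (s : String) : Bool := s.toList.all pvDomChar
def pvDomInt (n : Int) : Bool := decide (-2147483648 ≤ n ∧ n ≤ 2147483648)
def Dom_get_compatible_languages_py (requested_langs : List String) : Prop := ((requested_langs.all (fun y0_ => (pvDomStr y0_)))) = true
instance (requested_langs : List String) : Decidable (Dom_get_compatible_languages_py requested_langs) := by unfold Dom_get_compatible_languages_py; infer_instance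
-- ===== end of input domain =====

-- B replaces A's staged early-return cascade with one fused classification pass (flags + buckets) and a final decision; alternative decomposition, same cost. 


-- ===== PORT A =====
-- Port of A: literal cascade of guards; the dead `result` variable is kept as a let.
def get_compatible_languages_py (requested_langs : List String) : List String :=
  if requested_langs = [] then ["en"]
  else
    let _result : List String := if ¬ requested_langs.contains "en" then ["en"] else []
    if requested_langs.contains "ta" then ["en", "ta"]
    else if requested_langs.contains "ml" then ["en", "ml"]
    else
      let dravidian := requested_langs.filter (fun l => (["te", "kn"] : List String).contains l)
      if dravidian ≠ [] then ["en"] ++ dravidian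
      else
        let devanagari := requested_langs.filter (fun l => (["hi", "mr", "ne"] : List String).contains l)
        if devanagari ≠ [] then ["en"] ++ devanagari
        else ["en"]

-- ===== PORT B =====
-- loop state: (has_ta, has_ml, dravidian bucket, devanagari bucket)
def pvClassify (st : Bool × Bool × List String × List String) (lang : String) :
    Bool × Bool × List String × List String :=
  if lang = "ta" then (true, st.2)
  else if lang = "ml" then (st.1, true, st.2.2)
  else if lang = "te" ∨ lang = "kn" then
    (st.1, st.2.1, st.2.2.1 ++ [lang], st.2.2.2)
  else if lang = "hi" ∨ lang = "mr" ∨ lang = "ne" then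
    (st.1, st.2.1, st.2.2.1, st.2.2.2 ++ [lang])
  else st

def get_compatible_languages_py_alt (requested_langs : List String) : List String :=
  let st := requested_langs.foldl pvClassify (false, false, [], [])
  if st.1 then ["en", "ta"]
  else if st.2.1 then ["en", "ml"]
  else if st.2.2.1 ≠ [] then ["en"] ++ st.2.2.1
  else if st.2.2.2 ≠ [] then ["en"] ++ st.2.2.2
  else ["en"]

-- ===== PRECONDITION & SPEC =====
def Spec_get_compatible_languages_py (requested_langs : List String) (out : List String) : Prop := out = get_compatible_languages_py_alt requested_langs
instance (requested_langs : List String) (out : List String) : Decidable (Spec_get_compatible_languages_py requested_langs out) := by unfold Spec_get_compatible_languages_py; infer_instance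

-- ===== CLAIM (what is proved, stated in full; the proofs are below) =====
def Claim_equal_get_compatible_languages_py : Prop := ∀ (requested_langs : List String), Dom_get_compatible_languages_py requested_langs → Spec_get_compatible_languages_py requested_langs (get_compatible_languages_py requested_langs)

-- ===== LEMMAS AND PROOFS =====

-- characterization of the fused pass in terms of A's staged scans/filters
theorem pvClassify_foldl (xs : List String) (a b : Bool) (dr dev : List String) :
    xs.foldl pvClassify (a, b, dr, dev) =
      (a || xs.contains "ta", b || xs.contains "ml",
       dr ++ xs.filter (fun l => (["te", "kn"] : List String).contains l),
       dev ++ xs.filter (fun l => (["hi", "mr", "ne"] : List String).contains l)) := by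
  induction xs generalizing a b dr dev with
  | nil => simp
  | cons x rest ih =>
    simp only [List.foldl_cons, pvClassify]
    split_ifs with h1 h2 h3 h4
    · subst h1; rw [ih]; simp
    · subst h2; rw [ih]; simp
    · rw [ih]; rcases h3 with h | h <;> subst h <;> simp
    · rw [ih]; rcases h4 with h | h | h <;> subst h <;> simp
    · rw [ih]
      push Not at h3 h4
      simp [h3.1, h3.2, h4.1, h4.2.1, h4.2.2, Ne.symm h1, Ne.symm h2]

-- ===== VERDICT (by name: the statement is the Claim_ definition above) =====
theorem get_compatible_languages_py_spec : Claim_equal_get_compatible_languages_py := by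
  intro xs _
  unfold Spec_get_compatible_languages_py get_compatible_languages_py get_compatible_languages_py_alt
  rw [pvClassify_foldl]
  rcases xs with _ | ⟨x, rest⟩
  · decide
  · simp only [Bool.false_or, List.nil_append]
    split_ifs <;> simp_all
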